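-- pv_equiv track=rewrite | github.com/benoitlx/aoc2025 | day7/part2.py | count_timelines_quantum
-- ===== SOURCE A (Python) =====
-- def count_timelines_quantum(grid, h, w, start):
--     if start is None:
--         return 0
--     sr, sc = start
--     active = [0] * w
--     active[sc] = 1
--     exits = 0
--
--     for r in range(sr + 1, h):
--         row = grid[r]
--         next_active = [0] * w
--         for j, cnt in enumerate(active):
--             if cnt == 0:
--                 continue
--             cell = row[j]
--             if cell == '^':
--                 if j - 1 >= 0:
--                     next_active[j - 1] += cnt
--                 else:
--                     exits += cnt
--                 if j + 1 < w:
--                     next_active[j + 1] += cnt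
--                 else:
--                     exits += cnt
--             else:
--                 next_active[j] += cnt
--         active = next_active
--
--     return exits + sum(active)
-- ===== SOURCE B (Python) =====
-- def count_timelines_quantum(grid, h, w, start):
--     # Backward DP: f[c] = number of beam terminations for a unit beam entering
--     # the rows below the current one at column c.
--     if start is None:
--         return 0
--     sr, sc = start
--     f = [1] * w
--     for r in range(h - 1, sr, -1):
--         row = grid[r]
--         f = [
--             ((f[c - 1] if c - 1 >= 0 else 1) + (f[c + 1] if c + 1 < w else 1))
--             if row[c] == '^' else f[c]
--             for c in range(w)
--         ]
--     return f[sc]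
-- ===== Notes on version B (the rewrite author's own statement) =====
-- stated objective: alternative
-- what changed: Replaces A's forward scatter of per-column beam counts (with an exits accumulator and in-place += updates into next_active) by a backward bottom-up DP that gathers, for each column, the number of terminations of a unit beam entering there, returning f[sc] with no exits counter.
-- outside the precondition, e.g. on count_timelines_quantum(['..', 'x'], 2, 2, (0, 0)): A returns 1, B raises IndexError
import Mathlib
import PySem

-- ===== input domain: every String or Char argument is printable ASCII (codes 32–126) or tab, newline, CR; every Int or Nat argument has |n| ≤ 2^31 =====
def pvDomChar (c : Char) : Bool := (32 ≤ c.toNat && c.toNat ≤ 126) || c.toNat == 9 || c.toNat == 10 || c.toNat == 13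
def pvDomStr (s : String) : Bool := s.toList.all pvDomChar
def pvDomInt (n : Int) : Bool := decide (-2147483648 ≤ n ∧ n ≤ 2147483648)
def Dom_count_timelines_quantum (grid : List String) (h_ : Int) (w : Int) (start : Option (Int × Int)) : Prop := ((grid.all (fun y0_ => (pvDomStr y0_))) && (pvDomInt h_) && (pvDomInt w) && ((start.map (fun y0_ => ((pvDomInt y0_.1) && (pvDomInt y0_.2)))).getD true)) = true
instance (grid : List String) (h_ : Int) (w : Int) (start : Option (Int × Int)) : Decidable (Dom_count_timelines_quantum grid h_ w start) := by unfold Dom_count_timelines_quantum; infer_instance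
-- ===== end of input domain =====

-- B replaces A's forward scattering of beam counts by a backward (bottom-up) DP gathering,
-- per column, the termination count of a unit beam entering there — an alternative
-- decomposition of the same cost; the agreement of the return values is proved below.

-- ===== PORT A =====
-- inner loop body: one enumerate entry (j, cnt) updating (next_active, exits)
def pvAInner (w : Int) (row : String) (p : List Int × Int) (jc : Int × Int) : List Int × Int :=
  if jc.2 = 0 then p
  else if (PySem.Str.pyGet? row jc.1).getD ' ' = '^' then
    let p1 := if jc.1 - 1 ≥ 0 then
        (PySem.List.pySetD p.1 (jc.1 - 1) (PySem.List.pyGetD p.1 (jc.1 - 1) 0 + jc.2), p.2)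
      else (p.1, p.2 + jc.2)
    if jc.1 + 1 < w then
        (PySem.List.pySetD p1.1 (jc.1 + 1) (PySem.List.pyGetD p1.1 (jc.1 + 1) 0 + jc.2), p1.2)
    else (p1.1, p1.2 + jc.2)
  else (PySem.List.pySetD p.1 jc.1 (PySem.List.pyGetD p.1 jc.1 0 + jc.2), p.2)

-- one grid row: 'next_active = [0]*w; for j, cnt in enumerate(active): …; active = next_active'
def pvARow (w : Int) (row : String) (st : List Int × Int) : List Int × Int :=
  (PySem.List.enumerate st.1).foldl (pvAInner w row) (List.replicate w.toNat 0, st.2)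

def count_timelines_quantum (grid : List String) (h_ : Int) (w : Int) (start : Option (Int × Int)) : Int :=
  match start with
  | none => 0
  | some (sr, sc) =>
    let st := (PySem.List.pyRange (sr + 1) h_ 1).foldl
      (fun st r => pvARow w (PySem.List.pyGetD grid r "") st)
      (PySem.List.pySetD (List.replicate w.toNat 0) sc 1, 0)
    st.2 + st.1.sum

-- ===== PORT B =====
-- one grid row of the backward DP: the list comprehension over range(w)
def pvBRow (w : Int) (row : String) (f : List Int) : List Int :=
  (PySem.List.pyRange 0 w 1).map (fun c =>
    if (PySem.Str.pyGet? row c).getD ' ' = '^' then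
      (if c - 1 ≥ 0 then PySem.List.pyGetD f (c - 1) 0 else 1) +
      (if c + 1 < w then PySem.List.pyGetD f (c + 1) 0 else 1)
    else PySem.List.pyGetD f c 0)

def count_timelines_quantum_alt (grid : List String) (h_ : Int) (w : Int) (start : Option (Int × Int)) : Int :=
  match start with
  | none => 0
  | some (sr, sc) =>
    let f := (PySem.List.pyRange (h_ - 1) sr (-1)).foldl
      (fun f r => pvBRow w (PySem.List.pyGetD grid r "") f)
      (List.replicate w.toNat 1)
    PySem.List.pyGetD f sc 0

-- ===== PRECONDITION & SPEC =====
-- Pre_ excludes exactly the inputs on which one of the programs raises IndexError: a start column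
-- outside the w-wide band, a visited row index outside the grid, or a visited row shorter than w
-- (on such a short row A still returns a value when no beam reaches the missing cells, but B
-- reads every cell of each visited row and raises there).
def Pre_count_timelines_quantum (grid : List String) (h_ : Int) (w : Int) (start : Option (Int × Int)) : Prop :=
  ∀ p ∈ start.toList,
    PySem.Raise.InRange w.toNat p.2 ∧
    (h_ ≤ p.1 + 1 ∨ (-(grid.length : Int) ≤ p.1 + 1 ∧ h_ ≤ (grid.length : Int))) ∧
    ∀ k ∈ List.range grid.length,
      ((p.1 + 1 ≤ (k : Int) ∧ (k : Int) < h_) ∨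
       (p.1 + 1 ≤ (k : Int) - (grid.length : Int) ∧ (k : Int) - (grid.length : Int) < h_)) →
      w.toNat ≤ (grid.getD k "").toList.length
instance (grid : List String) (h_ : Int) (w : Int) (start : Option (Int × Int)) : Decidable (Pre_count_timelines_quantum grid h_ w start) := by
  unfold Pre_count_timelines_quantum PySem.Raise.InRange; infer_instance

def pvWitness_count_timelines_quantum : List String × Int × Int × (Option (Int × Int)) :=
  (["^^", ".^"], 2, 2, some (0, 0))

def Spec_count_timelines_quantum (grid : List String) (h_ : Int) (w : Int) (start : Option (Int × Int)) (out : Int) : Prop := out = count_timelines_quantum_alt grid h_ w start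
instance (grid : List String) (h_ : Int) (w : Int) (start : Option (Int × Int)) (out : Int) : Decidable (Spec_count_timelines_quantum grid h_ w start out) := by unfold Spec_count_timelines_quantum; infer_instance

-- ===== CLAIM (what is proved, stated in full; the proofs are below) =====
def Claim_equal_count_timelines_quantum : Prop := ∀ (grid : List String) (h_ : Int) (w : Int) (start : Option (Int × Int)), Dom_count_timelines_quantum grid h_ w start → Pre_count_timelines_quantum grid h_ w start → Spec_count_timelines_quantum grid h_ w start (count_timelines_quantum grid h_ w start)

-- ===== LEMMAS AND PROOFS =====

-- weighted inner product of two count vectors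
def pvDot (xs ys : List Int) : Int := (List.zipWith (· * ·) xs ys).sum

-- the value B's row step assigns to column c (the termination count gathered from f)
def pvContrib (w : Int) (row : String) (f : List Int) (c : Int) : Int :=
  if (PySem.Str.pyGet? row c).getD ' ' = '^' then
    (if c - 1 ≥ 0 then PySem.List.pyGetD f (c - 1) 0 else 1) +
    (if c + 1 < w then PySem.List.pyGetD f (c + 1) 0 else 1)
  else PySem.List.pyGetD f c 0

theorem pvDot_cons (x : Int) (xs : List Int) (y : Int) (ys : List Int) :
    pvDot (x :: xs) (y :: ys) = x * y + pvDot xs ys := by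
  simp [pvDot]

theorem pvDot_replicate_one (xs : List Int) : pvDot xs (List.replicate xs.length 1) = xs.sum := by
  induction xs with
  | nil => rfl
  | cons x xs ih => simp [List.replicate_succ, pvDot_cons, ih]

theorem pvDot_replicate_zero_left (n : ℕ) (f : List Int) : pvDot (List.replicate n 0) f = 0 := by
  induction n generalizing f with
  | zero => rfl
  | succ m ih =>
    cases f with
    | nil => rfl
    | cons y ys => simp [List.replicate_succ, pvDot_cons, ih]

theorem pvDot_set_add (a : List Int) (f : List Int) (k : ℕ) (c : Int)
    (hk : k < a.length) (hk' : k < f.length) :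
    pvDot (a.set k (a.getD k 0 + c)) f = pvDot a f + c * f.getD k 0 := by
  induction a generalizing f k with
  | nil => simp at hk
  | cons x xs ih =>
    cases f with
    | nil => simp at hk'
    | cons y ys =>
      cases k with
      | zero =>
        simp only [List.set_cons_zero, List.getD_cons_zero, pvDot_cons]
        ring
      | succ m =>
        have hm : m < xs.length := by simpa using hk
        have hm' : m < ys.length := by simpa using hk'
        simp only [List.set_cons_succ, List.getD_cons_succ, pvDot_cons]
        rw [ih ys m hm hm']
        ring

theorem pvDot_unit (n : ℕ) (k : ℕ) (f : List Int) (hk : k < n) (hf : f.length = n) :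
    pvDot ((List.replicate n 0).set k 1) f = f.getD k 0 := by
  induction n generalizing k f with
  | zero => omega
  | succ m ih =>
    cases f with
    | nil => exact absurd hf (by simp)
    | cons y ys =>
      have hys : ys.length = m := by simpa using hf
      cases k with
      | zero => simp [List.replicate_succ, pvDot_cons, pvDot_replicate_zero_left]
      | succ j =>
        have hj : j < m := by omega
        simp [List.replicate_succ, pvDot_cons, ih j ys hj hys]

theorem pv_length_pvAInner (w : Int) (row : String) (p : List Int × Int) (jc : Int × Int) :
    (pvAInner w row p jc).1.length = p.1.length := by
  unfold pvAInner
  split_ifs <;> simp [PySem.List.length_pySetD]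

theorem pv_length_pvAFold (w : Int) (row : String) :
    ∀ (a : List Int) (s : Int) (p : List Int × Int),
      ((PySem.List.enumerate a s).foldl (pvAInner w row) p).1.length = p.1.length := by
  intro a
  induction a with
  | nil => intro s p; simp [PySem.List.enumerate_nil]
  | cons x xs ih =>
    intro s p
    rw [PySem.List.enumerate_cons]
    simp only [List.foldl_cons]
    rw [ih (s + 1) (pvAInner w row p (s, x))]
    exact pv_length_pvAInner w row p (s, x)

theorem pv_length_pvARow (w : Int) (row : String) (st : List Int × Int) :
    (pvARow w row st).1.length = w.toNat := by
  unfold pvARow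
  rw [pv_length_pvAFold]
  simp

theorem pv_length_pvBRow (w : Int) (row : String) (f : List Int) :
    (pvBRow w row f).length = w.toNat := by
  simp [pvBRow, PySem.List.length_pyRange_one]

theorem pv_getElem_pvBRow (w : Int) (row : String) (f : List Int) (k : ℕ)
    (hk : k < (pvBRow w row f).length) :
    (pvBRow w row f)[k] = pvContrib w row f (k : Int) := by
  unfold pvBRow
  rw [List.getElem_map, PySem.List.getElem_pyRange_one]
  simp [pvContrib]

-- the adjoint step: processing one enumerate entry changes exits + ⟨next_active, f⟩ by cnt·contrib(j)
theorem pvAInner_dot (w : Int) (row : String) (p : List Int × Int) (jc : Int × Int)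
    (f : List Int) (hp : p.1.length = w.toNat) (hf : f.length = w.toNat)
    (h0 : 0 ≤ jc.1) (h1 : jc.1 < (w.toNat : Int)) :
    (pvAInner w row p jc).2 + pvDot (pvAInner w row p jc).1 f
      = p.2 + pvDot p.1 f + jc.2 * pvContrib w row f jc.1 := by
  have hw : (w.toNat : Int) = w := by omega
  unfold pvAInner pvContrib
  by_cases hz : jc.2 = 0
  · simp [hz]
  · simp only [if_neg hz]
    by_cases hc : (PySem.Str.pyGet? row jc.1).getD ' ' = '^'
    · simp only [if_pos hc]
      by_cases hl : jc.1 - 1 ≥ 0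
      · by_cases hr : jc.1 + 1 < w
        · simp only [if_pos hl, if_pos hr]
          rw [PySem.List.pyGetD_of_nonneg f 0 (show (0:Int) ≤ jc.1 - 1 by omega),
              PySem.List.pyGetD_of_nonneg f 0 (show (0:Int) ≤ jc.1 + 1 by omega)]
          rw [PySem.List.pyGetD_of_nonneg p.1 0 (show (0:Int) ≤ jc.1 - 1 by omega),
              PySem.List.pySetD_of_nonneg p.1 _ (show (0:Int) ≤ jc.1 - 1 by omega)]
          rw [PySem.List.pyGetD_of_nonneg _ 0 (show (0:Int) ≤ jc.1 + 1 by omega),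
              PySem.List.pySetD_of_nonneg _ _ (show (0:Int) ≤ jc.1 + 1 by omega)]
          rw [pvDot_set_add _ f _ jc.2
                (by simp only [List.length_set]; rw [hp]; omega) (by rw [hf]; omega),
              pvDot_set_add _ f _ jc.2 (by rw [hp]; omega) (by rw [hf]; omega)]
          ring
        · simp only [if_pos hl, if_neg hr]
          rw [PySem.List.pyGetD_of_nonneg f 0 (show (0:Int) ≤ jc.1 - 1 by omega)]
          rw [PySem.List.pyGetD_of_nonneg p.1 0 (show (0:Int) ≤ jc.1 - 1 by omega),
              PySem.List.pySetD_of_nonneg p.1 _ (show (0:Int) ≤ jc.1 - 1 by omega)]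
          rw [pvDot_set_add _ f _ jc.2 (by rw [hp]; omega) (by rw [hf]; omega)]
          ring
      · by_cases hr : jc.1 + 1 < w
        · simp only [if_neg hl, if_pos hr]
          rw [PySem.List.pyGetD_of_nonneg f 0 (show (0:Int) ≤ jc.1 + 1 by omega)]
          rw [PySem.List.pyGetD_of_nonneg p.1 0 (show (0:Int) ≤ jc.1 + 1 by omega),
              PySem.List.pySetD_of_nonneg p.1 _ (show (0:Int) ≤ jc.1 + 1 by omega)]
          rw [pvDot_set_add _ f _ jc.2 (by rw [hp]; omega) (by rw [hf]; omega)]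
          ring
        · simp only [if_neg hl, if_neg hr]
          ring
    · simp only [if_neg hc]
      rw [PySem.List.pyGetD_of_nonneg f 0 h0]
      rw [PySem.List.pyGetD_of_nonneg p.1 0 h0,
          PySem.List.pySetD_of_nonneg p.1 _ h0]
      rw [pvDot_set_add _ f _ jc.2 (by rw [hp]; omega) (by rw [hf]; omega)]
      ring

-- the inner fold over enumerate, with the running start index s
theorem pvAFold_dot (w : Int) (row : String) (f : List Int) (hf : f.length = w.toNat) :
    ∀ (a : List Int) (s : Int) (p : List Int × Int),
      p.1.length = w.toNat → 0 ≤ s → s + (a.length : Int) ≤ (w.toNat : Int) →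
      ((PySem.List.enumerate a s).foldl (pvAInner w row) p).2
        + pvDot ((PySem.List.enumerate a s).foldl (pvAInner w row) p).1 f
      = p.2 + pvDot p.1 f + pvDot a ((pvBRow w row f).drop s.toNat) := by
  intro a
  induction a with
  | nil => intro s p hp hs hsa; simp [PySem.List.enumerate_nil, pvDot]
  | cons x xs ih =>
    intro s p hp hs hsa
    rw [PySem.List.enumerate_cons]
    simp only [List.foldl_cons]
    have hs1 : s < (w.toNat : Int) := by
      simp only [List.length_cons] at hsa; omega
    have hp' : (pvAInner w row p (s, x)).1.length = w.toNat := by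
      rw [pv_length_pvAInner]; exact hp
    have hsa' : (s + 1) + (xs.length : Int) ≤ (w.toNat : Int) := by
      simp only [List.length_cons] at hsa; omega
    rw [ih (s + 1) (pvAInner w row p (s, x)) hp' (by omega) hsa']
    rw [pvAInner_dot w row p (s, x) f hp hf hs hs1]
    have hlt : s.toNat < (pvBRow w row f).length := by
      rw [pv_length_pvBRow]; omega
    rw [List.drop_eq_getElem_cons hlt, pvDot_cons]
    rw [pv_getElem_pvBRow w row f s.toNat hlt]
    have h1 : ((s.toNat : Int)) = s := by omega
    have h2 : (s + 1).toNat = s.toNat + 1 := by omega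
    rw [h1, h2]
    ring

-- one full row of A against one backward step of B
theorem pvARow_dot (w : Int) (row : String) (f : List Int) (st : List Int × Int)
    (hst : st.1.length = w.toNat) (hf : f.length = w.toNat) :
    (pvARow w row st).2 + pvDot (pvARow w row st).1 f
      = st.2 + pvDot st.1 (pvBRow w row f) := by
  unfold pvARow
  rw [pvAFold_dot w row f hf st.1 0 (List.replicate w.toNat 0, st.2)
        (by simp) le_rfl (by rw [hst]; omega)]
  simp [pvDot_replicate_zero_left]

theorem pv_length_foldr_pvBRow (w : Int) (grid : List String) (rs : List Int) :
    (rs.foldr (fun r f => pvBRow w (PySem.List.pyGetD grid r "") f)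
      (List.replicate w.toNat 1)).length = w.toNat := by
  induction rs with
  | nil => simp
  | cons r rs ih => simp [pv_length_pvBRow]

-- the main invariant: A's forward fold against B's backward fold over the same row indices
theorem pvOuter (w : Int) (grid : List String) :
    ∀ (rs : List Int) (st : List Int × Int), st.1.length = w.toNat →
      (rs.foldl (fun st r => pvARow w (PySem.List.pyGetD grid r "") st) st).2
        + (rs.foldl (fun st r => pvARow w (PySem.List.pyGetD grid r "") st) st).1.sum
      = st.2 + pvDot st.1
          (rs.foldr (fun r f => pvBRow w (PySem.List.pyGetD grid r "") f)
            (List.replicate w.toNat 1)) := by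
  intro rs
  induction rs with
  | nil =>
    intro st hst
    simp only [List.foldl_nil, List.foldr_nil]
    rw [← hst, pvDot_replicate_one]
  | cons r rs ih =>
    intro st hst
    simp only [List.foldl_cons, List.foldr_cons]
    rw [ih (pvARow w (PySem.List.pyGetD grid r "") st) (pv_length_pvARow w _ st)]
    rw [pvARow_dot w (PySem.List.pyGetD grid r "")
          (rs.foldr (fun r f => pvBRow w (PySem.List.pyGetD grid r "") f)
            (List.replicate w.toNat 1)) st hst (pv_length_foldr_pvBRow w grid rs)]

-- extraction of the start coordinate: ⟨unit vector at sc, F⟩ = F[sc] (Python indexing)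
theorem pvDot_pySetD_unit (F : List Int) (sc : Int) (n : ℕ) (hF : F.length = n)
    (hin : PySem.Raise.InRange n sc) :
    pvDot (PySem.List.pySetD (List.replicate n 0) sc 1) F = PySem.List.pyGetD F sc 0 := by
  subst hF
  obtain ⟨hlo, hhi⟩ := hin
  by_cases h0 : 0 ≤ sc
  · rw [PySem.List.pySetD_of_nonneg _ _ h0, PySem.List.pyGetD_of_nonneg _ _ h0]
    exact pvDot_unit F.length sc.toNat F (by omega) rfl
  · have hsc : sc = -(((-sc).toNat : ℕ) : Int) := by omega
    have hk1 : 0 < (-sc).toNat := by omega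
    have hk2 : (-sc).toNat ≤ F.length := by omega
    rw [hsc, PySem.List.pyGetD_neg_natCast F (-sc).toNat 0 hk1 hk2]
    have hidx : PySem.List.pyIdx? (List.replicate (n := F.length) (0:Int)).length
          (-(((-sc).toNat : ℕ) : Int)) = some (F.length - (-sc).toNat) := by
      simp only [PySem.List.pyIdx?, List.length_replicate]
      rw [if_neg (by omega), if_pos (by omega)]
      congr 1
      omega
    have hset : PySem.List.pySetD (List.replicate F.length (0:Int)) (-(((-sc).toNat : ℕ) : Int)) 1
        = (List.replicate F.length (0:Int)).set (F.length - (-sc).toNat) 1 := by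
      simp only [PySem.List.pySetD, PySem.List.pySet?, hidx, Option.map_some, Option.getD_some]
    rw [hset]
    rw [pvDot_unit F.length (F.length - (-sc).toNat) F (by omega) rfl]
    rw [List.getD_eq_getElem F 0 (by omega)]

-- ===== VERDICT (by name: the statement is the Claim_ definition above) =====
theorem count_timelines_quantum_spec : Claim_equal_count_timelines_quantum := by
  intro grid h_ w start _hDom hPre
  unfold Spec_count_timelines_quantum
  match start with
  | none => rfl
  | some (sr, sc) =>
    have hin : PySem.Raise.InRange w.toNat sc :=
      (hPre (sr, sc) (by simp [Option.toList])).1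
    show count_timelines_quantum grid h_ w (some (sr, sc))
        = count_timelines_quantum_alt grid h_ w (some (sr, sc))
    unfold count_timelines_quantum count_timelines_quantum_alt
    simp only []
    rw [pvOuter w grid (PySem.List.pyRange (sr + 1) h_ 1)
          (PySem.List.pySetD (List.replicate w.toNat 0) sc 1, 0)
          (by simp [PySem.List.length_pySetD])]
    have hrev : PySem.List.pyRange (h_ - 1) sr (-1)
        = (PySem.List.pyRange (sr + 1) h_ 1).reverse := by
      rw [PySem.List.pyRange_neg_one_eq_reverse]
      norm_num
    rw [hrev, List.foldl_reverse]
    rw [pvDot_pySetD_unit _ sc w.toNat (pv_length_foldr_pvBRow w grid _) hin]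
    norm_num
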